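-- pv_equiv track=rewrite | github.com/reivak720/cows | racer.py | venbrew
-- ===== SOURCE A (Python) =====
-- def venbrew(cows,limit=10):
--
--     cow_as_list = [[key, value] for key, value in cows.items()]
--     cow_as_list.sort(key=lambda x: x[1], reverse = True)
--
--     list_of_trips = []
--
--     while cow_as_list:
--         copy_of_list = cow_as_list[:]
--         temporary_list = []
--         limit_temp = limit
--
--         for item in cow_as_list:
--             if item[1] <= limit_temp:
--                 limit_temp -= item[1]
--                 copy_of_list.remove(item)
--                 temporary_list.append(item[0])
--
--         list_of_trips.append(temporary_list)
--         cow_as_list = copy_of_list[:]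
--
--     return list_of_trips
-- ===== SOURCE B (Python) =====
-- def venbrew(cows, limit=10):
--     # First-fit decreasing in a single pass: sort once, keep each open
--     # trip's remaining capacity, place every cow into the first trip it fits
--     # (opening a new trip when none fits).
--     trips = []  # each entry: [list of keys, remaining capacity]
--     for key, w in sorted(cows.items(), key=lambda kv: kv[1], reverse=True):
--         for trip in trips:
--             if w <= trip[1]:
--                 trip[0].append(key)
--                 trip[1] -= w
--                 break
--         else:
--             trips.append([[key], limit - w])
--     return [trip[0] for trip in trips]
-- ===== Notes on version B (the rewrite author's own statement) =====
-- stated objective: faster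
-- what changed: A repeatedly rescans and rebuilds the remaining cow list, one full greedy pass per trip; B sorts once and makes a single pass over the cows, placing each into the first open trip with enough remaining capacity (first-fit decreasing), which provably yields the same trips.
-- outside the precondition, e.g. on venbrew({'a': 11}, 10): A does not finish within the time limit, B returns [['a']]
import Mathlib
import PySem

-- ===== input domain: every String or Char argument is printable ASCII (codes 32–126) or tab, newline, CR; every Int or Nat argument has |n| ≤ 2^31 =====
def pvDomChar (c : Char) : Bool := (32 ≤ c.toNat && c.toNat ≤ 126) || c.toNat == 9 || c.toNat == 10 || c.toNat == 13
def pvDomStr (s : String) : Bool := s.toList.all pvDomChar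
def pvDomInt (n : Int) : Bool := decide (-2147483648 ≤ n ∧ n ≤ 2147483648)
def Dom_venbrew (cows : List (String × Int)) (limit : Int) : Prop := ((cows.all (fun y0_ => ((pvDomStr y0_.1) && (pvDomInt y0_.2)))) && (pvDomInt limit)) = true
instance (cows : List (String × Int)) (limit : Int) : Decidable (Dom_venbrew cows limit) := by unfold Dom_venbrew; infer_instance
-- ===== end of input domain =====

-- ===== PORT A =====
-- B is a one-pass first-fit-decreasing re-implementation of A's repeated greedy passes.
-- One greedy pass of A's while-body: fold over the sorted list with state
-- (copy_of_list, temporary_list, limit_temp); 'copy_of_list.remove(item)' is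
-- PySem.List.remove? (the getD fallback is unreachable: the item is in the copy).
def venbrewPass (l : List (String × Int)) (copy : List (String × Int))
    (temp : List String) (lim : Int) : List (String × Int) × List String :=
  match l with
  | [] => (copy, temp)
  | item :: rest =>
    if item.2 ≤ lim then
      venbrewPass rest ((PySem.List.remove? copy item).getD copy) (temp ++ [item.1]) (lim - item.2)
    else
      venbrewPass rest copy temp lim

-- A's while-loop; the fuel only makes the recursion total — under Pre_ each pass
-- removes at least one cow, so fuel = length never runs out (outside Pre_ the Python diverges).
def venbrewLoop (fuel : Nat) (l : List (String × Int)) (limit : Int)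
    (acc : List (List String)) : List (List String) :=
  match fuel, l with
  | _, [] => acc
  | 0, _ => acc
  | fuel + 1, l =>
    let p := venbrewPass l l [] limit
    venbrewLoop fuel p.1 limit (acc ++ [p.2])

def venbrew (cows : List (String × Int)) (limit : Int) : List (List String) :=
  let sortedCows := PySem.List.sorted cows (fun x => x.2) true
  venbrewLoop sortedCows.length sortedCows limit []

-- ===== PORT B =====
-- first-fit: put the key into the first trip with enough remaining capacity,
-- else open a new trip at the end (the for/else in Source B)
def ffdInsert (trips : List (List String × Int)) (key : String) (w : Int)
    (limit : Int) : List (List String × Int) :=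
  match trips with
  | [] => [([key], limit - w)]
  | (ks, r) :: rest =>
    if w ≤ r then (ks ++ [key], r - w) :: rest
    else (ks, r) :: ffdInsert rest key w limit

def venbrew_alt (cows : List (String × Int)) (limit : Int) : List (List String) :=
  ((PySem.List.sorted cows (fun x => x.2) true).foldl
      (fun trips kv => ffdInsert trips kv.1 kv.2 limit) []).map Prod.fst

-- ===== PRECONDITION & SPEC =====
-- Pre_ excludes (a) any cow heavier than limit — there A's while-loop never terminates
-- (the Python diverges) — and (b) duplicate keys, which cannot arise from a Python dict.
def Pre_venbrew (cows : List (String × Int)) (limit : Int) : Prop :=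
  (∀ p ∈ cows, p.2 ≤ limit) ∧ (cows.map Prod.fst).Nodup

instance (cows : List (String × Int)) (limit : Int) : Decidable (Pre_venbrew cows limit) := by
  unfold Pre_venbrew; infer_instance

def pvWitness_venbrew : (List (String × Int)) × Int :=
  ([("alice", 4), ("bob", 7), ("carol", 3)], 10)

def Spec_venbrew (cows : List (String × Int)) (limit : Int) (out : List (List String)) : Prop := out = venbrew_alt cows limit
instance (cows : List (String × Int)) (limit : Int) (out : List (List String)) : Decidable (Spec_venbrew cows limit out) := by unfold Spec_venbrew; infer_instance

-- ===== CLAIM (what is proved, stated in full; the proofs are below) =====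
def Claim_equal_venbrew : Prop := ∀ (cows : List (String × Int)) (limit : Int), Dom_venbrew cows limit → Pre_venbrew cows limit → Spec_venbrew cows limit (venbrew cows limit)

-- ===== LEMMAS AND PROOFS =====

-- A clean specification of one greedy pass: (keys taken, cows left over, capacity left)
def gp (c : Int) : List (String × Int) → List String × List (String × Int) × Int
  | [] => ([], [], c)
  | (k, w) :: t =>
    if w ≤ c then
      let p := gp (c - w) t
      (k :: p.1, p.2.1, p.2.2)
    else
      let p := gp c t
      (p.1, (k, w) :: p.2.1, p.2.2)

theorem gp_leftover_sublist (c : Int) (l : List (String × Int)) :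
    (gp c l).2.1.Sublist l := by
  induction l generalizing c with
  | nil => simp [gp]
  | cons x t ih =>
    obtain ⟨k, w⟩ := x
    by_cases h : w ≤ c
    · simpa [gp, h] using (ih (c - w)).cons _
    · simpa [gp, h] using List.Sublist.cons₂ (k, w) (ih c)

-- removing the first unprocessed item from the copy drops exactly that occurrence
theorem remove?_append_cons (r t : List (String × Int)) (v : String × Int)
    (hv : v ∉ r) : PySem.List.remove? (r ++ v :: t) v = some (r ++ t) := by
  induction r with
  | nil => simp [PySem.List.remove?_cons_self]
  | cons a r ihr =>
    have ha : a ≠ v := fun he => hv (he ▸ List.mem_cons_self ..)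
    have hv' : v ∉ r := fun hm => hv (List.mem_cons_of_mem _ hm)
    simp [PySem.List.remove?_cons_of_ne _ ha, ihr hv']

-- A's transliterated pass computes gp (needs: the still-unprocessed items are
-- distinct and absent from the already-leftover prefix r of the copy).
theorem venbrewPass_eq_gp (l : List (String × Int)) (hnd : l.Nodup) :
    ∀ (r : List (String × Int)) (temp : List String) (lim : Int),
    (∀ x ∈ r, x ∉ l) →
    venbrewPass l (r ++ l) temp lim
      = (r ++ (gp lim l).2.1, temp ++ (gp lim l).1) := by
  induction l with
  | nil => intro r temp lim _; simp [venbrewPass, gp]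
  | cons x t ih =>
    intro r temp lim hdisj
    obtain ⟨k, w⟩ := x
    have hkt : (k, w) ∉ t := (List.nodup_cons.mp hnd).1
    have hnt : t.Nodup := (List.nodup_cons.mp hnd).2
    by_cases h : w ≤ lim
    · have hr : (k, w) ∉ r := fun hm => hdisj _ hm (List.mem_cons_self ..)
      have hrem := remove?_append_cons r t (k, w) hr
      have hd' : ∀ x ∈ r, x ∉ t := fun x hx hxt =>
        hdisj x hx (List.mem_cons_of_mem _ hxt)
      simp only [venbrewPass, h, if_pos, hrem, Option.getD_some, gp]
      rw [ih hnt r (temp ++ [k]) (lim - w) hd']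
      simp
    · have hd' : ∀ x ∈ r ++ [(k, w)], x ∉ t := by
        intro x hx hxt
        rcases List.mem_append.mp hx with hx | hx
        · exact hdisj x hx (List.mem_cons_of_mem _ hxt)
        · simp at hx
          exact hkt (hx ▸ hxt)
      simp only [venbrewPass, h, if_neg, not_false_iff, gp]
      rw [show r ++ (k, w) :: t = (r ++ [(k, w)]) ++ t by simp,
        ih hnt (r ++ [(k, w)]) temp lim hd']
      simp

-- First-fit decomposition: processing l against a head trip (ks, c) fills that trip
-- exactly with the greedy-pass keys, and the leftovers flow on to the tail state S.
theorem ffd_decompose (limit : Int) (l : List (String × Int)) (ks : List String)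
    (c : Int) (S : List (List String × Int)) :
    l.foldl (fun trips kv => ffdInsert trips kv.1 kv.2 limit) ((ks, c) :: S)
      = (ks ++ (gp c l).1, (gp c l).2.2)
          :: (gp c l).2.1.foldl (fun trips kv => ffdInsert trips kv.1 kv.2 limit) S := by
  induction l generalizing ks c S with
  | nil => simp [gp]
  | cons x t ih =>
    obtain ⟨k, w⟩ := x
    by_cases h : w ≤ c
    · simp only [List.foldl_cons, ffdInsert, h, if_pos, gp]
      rw [ih (ks ++ [k]) (c - w) S]
      simp
    · simp only [List.foldl_cons, ffdInsert, h, if_neg, not_false_iff, gp]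
      rw [ih ks c (ffdInsert S k w limit)]

-- Main loop invariant: under the precondition, A's while-loop appends exactly B's trips.
theorem loop_eq_ffd (fuel : Nat) (l : List (String × Int)) (limit : Int)
    (acc : List (List String)) (hfuel : l.length ≤ fuel)
    (hle : ∀ p ∈ l, p.2 ≤ limit) (hnd : l.Nodup) :
    venbrewLoop fuel l limit acc
      = acc ++ (l.foldl (fun trips kv => ffdInsert trips kv.1 kv.2 limit) []).map Prod.fst := by
  induction fuel generalizing l acc with
  | zero =>
    have : l = [] := List.length_eq_zero_iff.mp (Nat.le_zero.mp hfuel)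
    subst this; simp [venbrewLoop]
  | succ f ih =>
    match l with
    | [] => simp [venbrewLoop]
    | (k, w) :: t =>
      have hw : w ≤ limit := hle (k, w) (List.mem_cons_self ..)
      have hnt : t.Nodup := (List.nodup_cons.mp hnd).2
      have hpass := venbrewPass_eq_gp ((k, w) :: t) hnd [] [] limit (by simp)
      simp only [List.nil_append] at hpass
      have hgp : gp limit ((k, w) :: t)
          = (k :: (gp (limit - w) t).1, (gp (limit - w) t).2.1, (gp (limit - w) t).2.2) := by
        simp [gp, hw]
      -- A side: one iteration of the while loop
      have hAstep : venbrewLoop (f + 1) ((k, w) :: t) limit acc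
          = venbrewLoop f (gp (limit - w) t).2.1 limit
              (acc ++ [k :: (gp (limit - w) t).1]) := by
        simp only [venbrewLoop, hpass, hgp]
      -- leftovers inherit the precondition and shrink
      have hsub : (gp (limit - w) t).2.1.Sublist t := gp_leftover_sublist _ _
      have hlen : (gp (limit - w) t).2.1.length ≤ f :=
        le_trans hsub.length_le (Nat.lt_succ_iff.mp (by simpa using hfuel))
      have hle' : ∀ p ∈ (gp (limit - w) t).2.1, p.2 ≤ limit := fun p hp =>
        hle p (List.mem_cons_of_mem _ (hsub.mem hp))
      have hnd' : (gp (limit - w) t).2.1.Nodup := hnt.sublist hsub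
      -- B side: decompose the fold
      have hB : ((k, w) :: t).foldl (fun trips kv => ffdInsert trips kv.1 kv.2 limit) []
          = ([k] ++ (gp (limit - w) t).1, (gp (limit - w) t).2.2)
              :: (gp (limit - w) t).2.1.foldl
                  (fun trips kv => ffdInsert trips kv.1 kv.2 limit) [] := by
        simpa [ffdInsert] using ffd_decompose limit t [k] (limit - w) []
      rw [hAstep, ih _ _ hlen hle' hnd', hB]
      simp

-- ===== VERDICT (by name: the statement is the Claim_ definition above) =====
theorem venbrew_spec : Claim_equal_venbrew := by
  intro cows limit _ hpre
  obtain ⟨hle, hnd⟩ := hpre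
  have hperm : (PySem.List.sorted cows (fun x => x.2) true).Perm cows :=
    PySem.List.sorted_perm ..
  have hle' : ∀ p ∈ PySem.List.sorted cows (fun x => x.2) true, p.2 ≤ limit :=
    fun p hp => hle p (hperm.mem_iff.mp hp)
  have hnd' : (PySem.List.sorted cows (fun x => x.2) true).Nodup := by
    have : cows.Nodup := hnd.of_map _
    exact (hperm.nodup_iff).mpr this
  show venbrew cows limit = venbrew_alt cows limit
  unfold venbrew venbrew_alt
  exact loop_eq_ffd _ _ _ _ le_rfl hle' hnd'
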